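-- pv_equiv track=rewrite | github.com/superyodi/burning-algorithm | kakao/blind2018_test5.py | make_multiset
-- ===== SOURCE A (Python) =====
-- def make_multiset(_str):
--     _str = _str.lower()
--
--     multi_set = []
--     skip_idx = -1
--
--     for i in range(len(_str) - 1):
--         if not _str[i].isalpha() or i == skip_idx:
--             continue
--         if not _str[i + 1].isalpha():
--             skip_idx = i + 1
--             continue
--         multi_set.append(_str[i:i + 2])
--
--     return multi_set
-- ===== SOURCE B (Python) =====
-- def make_multiset(_str):
--     s = _str.lower()
--     # stage 1: partition into maximal alphabetic runs
--     runs, cur = [], []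
--     for c in s:
--         if c.isalpha():
--             cur.append(c)
--         else:
--             if cur:
--                 runs.append(cur)
--             cur = []
--     if cur:
--         runs.append(cur)
--     # stage 2: pairwise bigrams inside each run (no per-pair checks needed)
--     return [a + b for r in runs for a, b in zip(r, r[1:])]
-- ===== Notes on version B (the rewrite author's own statement) =====
-- stated objective: alternative
-- what changed: Instead of A's single flat indexed loop with a skip_idx state, B first partitions the lowercased string into maximal alphabetic runs and then emits the pairwise bigrams inside each run, so no per-pair alphabetic test or per-index slicing is done in the emitting stage.
import Mathlib
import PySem

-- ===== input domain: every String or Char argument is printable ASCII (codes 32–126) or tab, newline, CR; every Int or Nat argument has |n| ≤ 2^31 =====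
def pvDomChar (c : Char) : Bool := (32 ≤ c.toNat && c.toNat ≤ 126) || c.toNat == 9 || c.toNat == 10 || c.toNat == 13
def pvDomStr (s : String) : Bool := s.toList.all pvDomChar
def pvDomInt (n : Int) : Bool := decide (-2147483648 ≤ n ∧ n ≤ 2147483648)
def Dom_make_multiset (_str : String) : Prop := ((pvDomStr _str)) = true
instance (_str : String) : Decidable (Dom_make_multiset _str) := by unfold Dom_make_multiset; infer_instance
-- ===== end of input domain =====

-- B replaces A's flat indexed loop (with its skip_idx state) by a two-stage
-- decomposition: partition the lowered string into maximal alphabetic runs,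
-- then emit pairwise bigrams inside each run; objective: alternative, same O(n).

-- ===== PORT A =====
def make_multiset (_str : String) : List String :=
  let cs := (PySem.Str.lower _str).toList          -- _str = _str.lower()
  (((PySem.List.pyRange 0 ((cs.length : Int) - 1) 1).foldl
    (fun (st : List String × Int) (i : Int) =>
      if (!(PySem.Chars.isalpha (PySem.List.pyGetD cs i ' '))) || (i == st.2) then st
      else if !(PySem.Chars.isalpha (PySem.List.pyGetD cs (i + 1) ' ')) then (st.1, i + 1)
      else (st.1 ++ [String.ofList (PySem.List.slice cs (some i) (some (i + 2)))], st.2))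
    ([], -1))).1

-- ===== PORT B =====
-- loop body of Source B's partition loop (state: finished runs, current run)
def mmStep (st : List (List Char) × List Char) (c : Char) : List (List Char) × List Char :=
  if PySem.Chars.isalpha c then (st.1, st.2 ++ [c])
  else ((if st.2 ≠ [] then st.1 ++ [st.2] else st.1), [])

def make_multiset_alt (_str : String) : List String :=
  let s := (PySem.Str.lower _str).toList           -- s = _str.lower()
  let st := s.foldl mmStep ([], [])                -- stage 1: maximal alphabetic runs
  let runs := if st.2 ≠ [] then st.1 ++ [st.2] else st.1
  -- stage 2: [a + b for r in runs for a, b in zip(r, r[1:])]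
  runs.flatMap (fun r => (r.zip (r.drop 1)).map (fun p => String.ofList [p.1, p.2]))

-- ===== PRECONDITION & SPEC =====
def Spec_make_multiset (_str : String) (out : List String) : Prop := out = make_multiset_alt _str
instance (_str : String) (out : List String) : Decidable (Spec_make_multiset _str out) := by unfold Spec_make_multiset; infer_instance

-- ===== CLAIM (what is proved, stated in full; the proofs are below) =====
def Claim_equal_make_multiset : Prop := ∀ (_str : String), Dom_make_multiset _str → Spec_make_multiset _str (make_multiset _str)

-- ===== LEMMAS AND PROOFS =====

-- Nat-level bigram predicate and value at position k (A-side characterisation)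
def mmP (cs : List Char) (k : Nat) : Bool :=
  PySem.Chars.isalpha (cs.getD k ' ') && PySem.Chars.isalpha (cs.getD (k + 1) ' ')
def mmF (cs : List Char) (k : Nat) : String := String.ofList ((cs.drop k).take 2)

-- common intermediate form: filtered adjacent pairs
def zipB (cs : List Char) : List String :=
  (cs.zip (cs.drop 1)).filterMap (fun p =>
    if PySem.Chars.isalpha p.1 && PySem.Chars.isalpha p.2
    then some (String.ofList [p.1, p.2]) else none)

-- per-run bigrams as in port B
def mmRB (r : List Char) : List String :=
  (r.zip (r.drop 1)).map (fun p => String.ofList [p.1, p.2])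

-- A's skip_idx only ever points at a non-alphabetic position, so its branch never
-- fires: the stateful fold equals the skip-free fold.
lemma mm_skip_free (cs : List Char) (l : List Int) (h0 : ∀ i ∈ l, 0 ≤ i) :
    ∀ (ms : List String) (skip : Int),
    (∀ j : Nat, (j : Int) = skip → PySem.Chars.isalpha (cs.getD j ' ') = false) →
    ((l.foldl
      (fun (st : List String × Int) (i : Int) =>
        if (!(PySem.Chars.isalpha (PySem.List.pyGetD cs i ' '))) || (i == st.2) then st
        else if !(PySem.Chars.isalpha (PySem.List.pyGetD cs (i + 1) ' ')) then (st.1, i + 1)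
        else (st.1 ++ [String.ofList (PySem.List.slice cs (some i) (some (i + 2)))], st.2))
      (ms, skip))).1
    = l.foldl
        (fun (ms : List String) (i : Int) =>
          if PySem.Chars.isalpha (PySem.List.pyGetD cs i ' ')
              && PySem.Chars.isalpha (PySem.List.pyGetD cs (i + 1) ' ')
          then ms ++ [String.ofList (PySem.List.slice cs (some i) (some (i + 2)))] else ms)
        ms := by
  induction l with
  | nil => intro ms skip _; rfl
  | cons i l ih =>
    intro ms skip hskip
    have hi : 0 ≤ i := h0 i (by simp)
    have h0' : ∀ j ∈ l, 0 ≤ j := fun j hj => h0 j (by simp [hj])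
    simp only [List.foldl_cons]
    by_cases ha : PySem.Chars.isalpha (PySem.List.pyGetD cs i ' ') = true
    · have hne : (i == skip) = false := by
        apply beq_eq_false_iff_ne.2
        intro he
        have : PySem.Chars.isalpha (cs.getD i.toNat ' ') = false :=
          hskip i.toNat (by omega)
        rw [← PySem.List.pyGetD_natCast cs i.toNat ' ', Int.toNat_of_nonneg hi] at this
        simp [ha] at this
      by_cases hb : PySem.Chars.isalpha (PySem.List.pyGetD cs (i + 1) ' ') = true
      · rw [if_neg (by rw [ha, hne]; simp), if_neg (by rw [hb]; simp),
            if_pos (by rw [ha, hb]; rfl)]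
        exact ih h0' _ skip hskip
      · have hb' : PySem.Chars.isalpha (PySem.List.pyGetD cs (i + 1) ' ') = false :=
          Bool.eq_false_iff.mpr hb
        rw [if_neg (by rw [ha, hne]; simp), if_pos (by rw [hb']; rfl),
            if_neg (by rw [ha, hb']; simp)]
        apply ih h0' ms (i + 1)
        intro j hj
        have hj' : PySem.List.pyGetD cs (i + 1) ' ' = cs.getD j ' ' := by
          rw [← hj, PySem.List.pyGetD_natCast]
        rw [← hj', hb']
    · have ha' : PySem.Chars.isalpha (PySem.List.pyGetD cs i ' ') = false :=
        Bool.eq_false_iff.mpr ha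
      rw [if_pos (by rw [ha']; simp), if_neg (by rw [ha']; simp)]
      exact ih h0' ms skip hskip

-- range(len-1) over ℤ is the cast of the ℕ range
lemma mm_range_cast (cs : List Char) :
    PySem.List.pyRange 0 ((cs.length : Int) - 1) 1
      = (List.range (cs.length - 1)).map (fun k : Nat => (k : Int)) := by
  cases cs with
  | nil => simp [PySem.List.pyRange_one_eq_nil (by omega : (-1 : Int) ≤ 0)]
  | cons a t =>
    have h : ((a :: t).length : Int) - 1 = ((t.length : Nat) : Int) := by
      simp
    rw [h, PySem.List.pyRange_zero_natCast]
    simp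

-- recursive characterisation of zipB
lemma zipB_cons_cons (a b : Char) (t : List Char) :
    zipB (a :: b :: t)
      = (if PySem.Chars.isalpha a && PySem.Chars.isalpha b
         then [String.ofList [a, b]] else []) ++ zipB (b :: t) := by
  have h1 : (a :: b :: t).zip ((a :: b :: t).drop 1)
      = (a, b) :: (b :: t).zip ((b :: t).drop 1) := by cases t <;> rfl
  unfold zipB
  rw [h1, List.filterMap_cons]
  by_cases h : (PySem.Chars.isalpha a && PySem.Chars.isalpha b) = true
  · rw [if_pos h, if_pos h]
    rfl
  · rw [if_neg h, if_neg h]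
    rfl

-- the ℕ-indexed filter/map equals the filtered adjacent-pairs form
lemma mm_nat_zip (cs : List Char) :
    ((List.range (cs.length - 1)).filter (mmP cs)).map (mmF cs) = zipB cs := by
  induction cs with
  | nil => rfl
  | cons a t ih =>
    cases t with
    | nil => rfl
    | cons b t' =>
      have hlen : (a :: b :: t').length - 1 = t'.length + 1 := by simp
      have hP : mmP (a :: b :: t') ∘ Nat.succ = mmP (b :: t') := by
        funext k; simp [mmP, Function.comp]
      have hF : mmF (a :: b :: t') ∘ Nat.succ = mmF (b :: t') := by
        funext k; simp [mmF, Function.comp]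
      rw [hlen, List.range_succ_eq_map, List.filter_cons]
      have hshift :
          ((List.map Nat.succ (List.range t'.length)).filter (mmP (a :: b :: t'))).map
              (mmF (a :: b :: t'))
            = ((List.range t'.length).filter (mmP (b :: t'))).map (mmF (b :: t')) := by
        rw [List.filter_map, hP, List.map_map, hF]
      rw [zipB_cons_cons]
      by_cases hab : (PySem.Chars.isalpha a && PySem.Chars.isalpha b) = true
      · have hP0 : mmP (a :: b :: t') 0 = true := by simpa [mmP] using hab
        rw [if_pos hP0, if_pos hab]
        simp only [List.map_cons, List.singleton_append]
        rw [hshift]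
        refine congrArg₂ _ ?_ (by rw [← (by simp : (b :: t').length - 1 = t'.length), ih])
        simp [mmF]
      · have hab' : (PySem.Chars.isalpha a && PySem.Chars.isalpha b) = false :=
          Bool.eq_false_iff.mpr hab
        have hP0 : mmP (a :: b :: t') 0 = false := by simpa [mmP] using hab'
        rw [if_neg (by simp [hP0]), if_neg (by simp [hab'])]
        simp only [List.nil_append]
        rw [hshift, ← (by simp : (b :: t').length - 1 = t'.length), ih]

-- a leading non-alphabetic character contributes nothing
lemma zipB_nonalpha_cons (c : Char) (hc : PySem.Chars.isalpha c = false) (ys : List Char) :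
    zipB (c :: ys) = zipB ys := by
  cases ys with
  | nil => rfl
  | cons y ys' => rw [zipB_cons_cons, hc]; simp

-- a non-alphabetic character severs zipB
lemma zipB_split (c : Char) (hc : PySem.Chars.isalpha c = false) (xs ys : List Char) :
    zipB (xs ++ c :: ys) = zipB xs ++ zipB ys := by
  induction xs with
  | nil =>
    rw [List.nil_append, zipB_nonalpha_cons c hc ys]
    rfl
  | cons a xs' ih =>
    cases xs' with
    | nil =>
      have h1 : (([a] ++ c :: ys : List Char)) = a :: c :: ys := rfl
      rw [h1, zipB_cons_cons, hc, zipB_nonalpha_cons c hc ys]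
      simp [zipB]
    | cons b xs'' =>
      have h1 : (((a :: b :: xs'') ++ c :: ys : List Char)) = a :: b :: (xs'' ++ c :: ys) := rfl
      have h2 : ((b :: xs'') ++ c :: ys : List Char) = b :: (xs'' ++ c :: ys) := rfl
      rw [h1, zipB_cons_cons, ← h2, ih, zipB_cons_cons]
      simp [List.append_assoc]

lemma zipB_run (r : List Char) :
    (∀ c ∈ r, PySem.Chars.isalpha c = true) → zipB r = mmRB r := by
  induction r with
  | nil => intro _; rfl
  | cons a t ih =>
    intro h
    cases t with
    | nil => rfl
    | cons b t' =>
      have ha : PySem.Chars.isalpha a = true := h a (by simp)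
      have hb : PySem.Chars.isalpha b = true := h b (by simp)
      rw [zipB_cons_cons, if_pos (by rw [ha, hb]; rfl)]
      have hrb : mmRB (a :: b :: t') = String.ofList [a, b] :: mmRB (b :: t') := by
        have h1 : (a :: b :: t').zip (List.drop 1 (a :: b :: t'))
            = (a, b) :: (b :: t').zip (List.drop 1 (b :: t')) := by cases t' <;> rfl
        unfold mmRB
        rw [h1, List.map_cons]
      rw [hrb, ih (fun c hc => h c (List.mem_cons_of_mem _ hc))]
      rfl

-- fold invariant for B's partition loop
lemma mm_fold_inv (cs : List Char) : ∀ (runs : List (List Char)) (cur : List Char),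
    (∀ c ∈ cur, PySem.Chars.isalpha c = true) →
    (if (cs.foldl mmStep (runs, cur)).2 ≠ []
     then (cs.foldl mmStep (runs, cur)).1 ++ [(cs.foldl mmStep (runs, cur)).2]
     else (cs.foldl mmStep (runs, cur)).1).flatMap mmRB
    = runs.flatMap mmRB ++ zipB (cur ++ cs) := by
  induction cs with
  | nil =>
    intro runs cur hcur
    simp only [List.foldl_nil, List.append_nil]
    by_cases h : cur = []
    · subst h; simp [zipB]
    · rw [if_pos h, List.flatMap_append, zipB_run cur hcur]
      simp
  | cons c cs ih =>
    intro runs cur hcur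
    by_cases hc : PySem.Chars.isalpha c = true
    · simp only [List.foldl_cons]
      rw [show mmStep (runs, cur) c = (runs, cur ++ [c]) from by simp [mmStep, hc]]
      rw [ih runs (cur ++ [c]) (by
        intro x hx
        rcases List.mem_append.1 hx with h | h
        · exact hcur x h
        · simp at h; subst h; exact hc)]
      simp [List.append_assoc]
    · have hc' : PySem.Chars.isalpha c = false := Bool.eq_false_iff.mpr hc
      simp only [List.foldl_cons]
      rw [show mmStep (runs, cur) c = ((if cur ≠ [] then runs ++ [cur] else runs), []) from by
        simp [mmStep, hc']]
      rw [ih _ [] (by intro x hx; simp at hx), zipB_split c hc' cur cs]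
      by_cases h : cur = []
      · subst h; simp [zipB]
      · rw [if_pos h, List.flatMap_append, zipB_run cur hcur]
        simp [List.append_assoc, zipB]

-- ===== VERDICT (by name: the statement is the Claim_ definition above) =====
theorem make_multiset_spec : Claim_equal_make_multiset := by
  intro s _
  unfold Spec_make_multiset make_multiset make_multiset_alt
  set cs := (PySem.Str.lower s).toList with hcs
  clear_value cs
  rw [mm_skip_free cs _ (fun i hi => ((PySem.List.mem_pyRange_one).1 hi).1) [] (-1)
      (by intro j hj; omega)]
  rw [PySem.List.foldl_append_if, mm_range_cast, List.filter_map, List.map_map]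
  have hP : ((fun i : Int =>
        PySem.Chars.isalpha (PySem.List.pyGetD cs i ' ')
          && PySem.Chars.isalpha (PySem.List.pyGetD cs (i + 1) ' ')) ∘ fun k : Nat => (k : Int))
      = mmP cs := by
    funext k
    have h1 : ((k : Int) + 1) = ((k + 1 : Nat) : Int) := by push_cast; ring
    simp only [Function.comp_apply, h1, PySem.List.pyGetD_natCast]
    rfl
  have hF : ((fun i : Int =>
        String.ofList (PySem.List.slice cs (some i) (some (i + 2)))) ∘ fun k : Nat => (k : Int))
      = mmF cs := by
    funext k
    have h2 : ((k : Int) + 2) = ((k : Int) + ((2 : Nat) : Int)) := by norm_num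
    simp only [Function.comp, h2, PySem.List.slice_natCast_add, mmF]
  rw [hP, hF, mm_nat_zip]
  have h0 := mm_fold_inv cs [] [] (by intro x hx; simp at hx)
  simp only [List.flatMap_nil, List.nil_append] at h0
  exact h0.symm
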